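-- pv_equiv track=rewrite | github.com/tomaasz/ocr-dashboard-v3 | app/routes/dashboard.py | _count_process_names
-- ===== SOURCE A (Python) =====
-- def _browser_process_patterns() -> tuple[str, ...]:
--     return (
--         "chrome",
--         "chromium",
--         "chrome-headless",
--         "chrome-headless-shell",
--         "google-chrome",
--         "msedge",
--         "firefox",
--         "WebKitWebProcess",
--         "WebKitNetworkProcess",
--     )
--
-- def _count_process_names(output: str) -> int:
--     patterns = _browser_process_patterns()
--     count = 0
--     for line in output.splitlines():
--         name = line.strip()
--         if not name:
--             continue
--         for pattern in patterns:
--             if name == pattern: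
--                 count += 1
--                 break
--     return count
-- ===== SOURCE B (Python) =====
-- def _browser_process_patterns():
--     return (
--         "chrome",
--         "chromium",
--         "chrome-headless",
--         "chrome-headless-shell",
--         "google-chrome",
--         "msedge",
--         "firefox",
--         "WebKitWebProcess",
--         "WebKitNetworkProcess",
--     )
--
-- def _count_process_names(output: str) -> int:
--     counts = {}
--     for line in output.splitlines():
--         name = line.strip()
--         if name:
--             counts[name] = counts.get(name, 0) + 1
--     return sum(counts.get(p, 0) for p in _browser_process_patterns())
-- ===== Notes on version B (the rewrite author's own statement) =====
-- stated objective: alternative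
-- what changed: B builds a frequency table of non-empty stripped lines in one pass and then sums the table entries for the nine pattern names, removing A's per-line inner scan over the pattern tuple.
import Mathlib
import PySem

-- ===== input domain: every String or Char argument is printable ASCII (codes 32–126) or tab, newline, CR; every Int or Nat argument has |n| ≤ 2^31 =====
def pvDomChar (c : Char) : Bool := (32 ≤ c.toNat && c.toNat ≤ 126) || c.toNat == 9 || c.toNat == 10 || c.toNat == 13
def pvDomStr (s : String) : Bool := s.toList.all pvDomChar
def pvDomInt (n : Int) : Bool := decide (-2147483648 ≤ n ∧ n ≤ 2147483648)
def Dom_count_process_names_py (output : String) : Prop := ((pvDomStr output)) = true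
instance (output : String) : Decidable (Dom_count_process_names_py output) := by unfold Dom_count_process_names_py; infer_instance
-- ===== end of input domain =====

-- B replaces A's per-line inner scan over the pattern tuple by a one-pass frequency
-- table of the non-empty stripped lines followed by one lookup per pattern (alternative).

-- ===== PORT A =====
def browserProcessPatterns : List String :=
  ["chrome", "chromium", "chrome-headless", "chrome-headless-shell",
   "google-chrome", "msedge", "firefox", "WebKitWebProcess", "WebKitNetworkProcess"]

-- inner 'for pattern in patterns: if name == pattern: count += 1; break'
def innerScan (name : String) : List String → Int → Int
  | [], count => count
  | p :: rest, count => if name = p then count + 1 else innerScan name rest count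

def count_process_names_py (output : String) : Int :=
  (PySem.Str.splitlines output).foldl
    (fun count line =>
      let name := PySem.Str.strip line
      if name = "" then count
      else innerScan name browserProcessPatterns count) 0

-- ===== PORT B =====
def count_process_names_py_alt (output : String) : Int :=
  let counts : PySem.Dict String Int :=
    (PySem.Str.splitlines output).foldl
      (fun d line =>
        let name := PySem.Str.strip line
        if name = "" then d
        else d.insert name (d.getD name 0 + 1)) PySem.Dict.empty
  browserProcessPatterns.foldl (fun acc p => acc + counts.getD p 0) 0

-- ===== PRECONDITION & SPEC =====
def Spec_count_process_names_py (output : String) (out : Int) : Prop := out = count_process_names_py_alt output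
instance (output : String) (out : Int) : Decidable (Spec_count_process_names_py output out) := by unfold Spec_count_process_names_py; infer_instance

-- ===== CLAIM (what is proved, stated in full; the proofs are below) =====
def Claim_equal_count_process_names_py : Prop := ∀ (output : String), Dom_count_process_names_py output → Spec_count_process_names_py output (count_process_names_py output)

-- ===== LEMMAS AND PROOFS =====

theorem innerScan_eq (name : String) (pats : List String) (c : Int) :
    innerScan name pats c = c + (if name ∈ pats then 1 else 0) := by
  induction pats generalizing c with
  | nil => simp [innerScan]
  | cons p rest ih =>
    by_cases h : name = p <;> simp [innerScan, h, ih, List.mem_cons]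

theorem empty_not_pattern : ("" ∈ browserProcessPatterns) = False := by decide

-- A's fold tallies the stripped lines that are patterns
theorem foldA_eq (lines : List String) (c : Int) :
    lines.foldl
      (fun count line =>
        let name := PySem.Str.strip line
        if name = "" then count
        else innerScan name browserProcessPatterns count) c
    = c + ((lines.map PySem.Str.strip).countP
        (fun n => decide (n ∈ browserProcessPatterns)) : Int) := by
  induction lines generalizing c with
  | nil => simp
  | cons l rest ih =>
    simp only [List.foldl_cons, List.map_cons, List.countP_cons]
    by_cases h : PySem.Str.strip l = ""
    · simp [h, ih, empty_not_pattern]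
    · rw [innerScan_eq]
      simp only [h, ih]
      by_cases hm : PySem.Str.strip l ∈ browserProcessPatterns <;>
        simp [hm] <;> omega

-- B's dict loop: lookup of a non-empty key counts its occurrences among stripped lines
theorem foldB_getD (p : String) (hp : p ≠ "") (lines : List String)
    (d : PySem.Dict String Int) :
    ((lines.foldl
        (fun d line =>
          let name := PySem.Str.strip line
          if name = "" then d
          else d.insert name (d.getD name 0 + 1)) d).getD p 0)
    = d.getD p 0 + ((lines.map PySem.Str.strip).countP (· == p) : Int) := by
  induction lines generalizing d with
  | nil => simp
  | cons l rest ih =>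
    simp only [List.foldl_cons, List.map_cons, List.countP_cons]
    by_cases h : PySem.Str.strip l = ""
    · simp [h, ih]
      exact hp
    · rw [if_neg h, ih]
      rw [PySem.Dict.getD_insert]
      by_cases he : p = PySem.Str.strip l
      · simp [he]; ring
      · have hne : (PySem.Str.strip l == p) = false := by
          simp; intro hx; exact he hx.symm
        simp [he, hne]

-- indicator sum over a Nodup list
theorem countP_cons_split (p : String) (rest : List String) (hp : p ∉ rest)
    (M : List String) :
    (M.countP (fun n => decide (n ∈ p :: rest)))
    = M.countP (· == p) + M.countP (fun n => decide (n ∈ rest)) := by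
  induction M with
  | nil => simp
  | cons x M ih =>
    rw [List.countP_cons, List.countP_cons, List.countP_cons, ih]
    by_cases hx : x = p
    · simp [hx, hp]; omega
    · by_cases hr : x ∈ rest <;> simp [hx, hr] <;> omega

theorem sum_counts (pats : List String) (hnd : pats.Nodup) (M : List String)
    (c : Int) :
    pats.foldl (fun acc p => acc + ((M.countP (· == p)) : Int)) c
    = c + ((M.countP (fun n => decide (n ∈ pats))) : Int) := by
  induction pats generalizing c with
  | nil => simp
  | cons p rest ih =>
    have hp : p ∉ rest := (List.nodup_cons.mp hnd).1
    have hrest : rest.Nodup := (List.nodup_cons.mp hnd).2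
    simp only [List.foldl_cons]
    rw [ih hrest, countP_cons_split p rest hp M]
    push_cast ; ring

-- ===== VERDICT (by name: the statement is the Claim_ definition above) =====
theorem count_process_names_py_spec : Claim_equal_count_process_names_py := by
  intro output _
  unfold Spec_count_process_names_py count_process_names_py count_process_names_py_alt
  rw [foldA_eq]
  have hcong :
      browserProcessPatterns.foldl
        (fun acc p =>
          acc + ((PySem.Str.splitlines output).foldl
            (fun d line =>
              let name := PySem.Str.strip line
              if name = "" then d
              else d.insert name (d.getD name 0 + 1)) PySem.Dict.empty).getD p 0) 0
      = browserProcessPatterns.foldl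
          (fun acc p =>
            acc + ((((PySem.Str.splitlines output).map PySem.Str.strip).countP (· == p)) : Int)) 0 := by
    apply PySem.List.foldl_congr_mem
    intro acc p hpmem
    have hall : ∀ q ∈ browserProcessPatterns, q ≠ "" := by decide
    have hp : p ≠ "" := hall p hpmem
    rw [foldB_getD p hp]
    simp
  rw [hcong, sum_counts browserProcessPatterns (by decide) _ 0]
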